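-- pv_equiv track=rewrite | github.com/manhitv/codesignal | Challenges.py | isOneSwapEnough
-- ===== SOURCE A (Python) =====
-- def isOneSwapEnough(s):
--     if s == s[::-1]:
--         return True
--     for i in range(len(s)-1):
--         for j in range(i+1, len(s)):
--             s1 = s[:i] + s[j] + s[i+1:j] + s[i] + s[j+1:]
--             if s1 == s1[::-1]:
--                 return True
--     return False
-- ===== SOURCE B (Python) =====
-- def isOneSwapEnough(s):
--     # Return value only; O(n^2): any useful swap must touch the outermost mismatched pair.
--     t = list(s)
--     n = len(t)
--     i, j = 0, n - 1
--     while i < j and t[i] == t[j]: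
--         i += 1
--         j -= 1
--     if i >= j:
--         return True
--     for k in range(n):
--         for a in (i, j):
--             t[a], t[k] = t[k], t[a]
--             if t == t[::-1]:
--                 return True
--             t[a], t[k] = t[k], t[a]
--     return False
-- ===== Notes on version B (the rewrite author's own statement) =====
-- stated objective: faster
-- what changed: Instead of trying all O(n^2) swap pairs and rebuilding the string for each, B scans inward to find the outermost mismatched pair (i,j) and only tries the O(n) swaps that involve i or j, since any palindrome-making swap must fix that pair.
import Mathlib
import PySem

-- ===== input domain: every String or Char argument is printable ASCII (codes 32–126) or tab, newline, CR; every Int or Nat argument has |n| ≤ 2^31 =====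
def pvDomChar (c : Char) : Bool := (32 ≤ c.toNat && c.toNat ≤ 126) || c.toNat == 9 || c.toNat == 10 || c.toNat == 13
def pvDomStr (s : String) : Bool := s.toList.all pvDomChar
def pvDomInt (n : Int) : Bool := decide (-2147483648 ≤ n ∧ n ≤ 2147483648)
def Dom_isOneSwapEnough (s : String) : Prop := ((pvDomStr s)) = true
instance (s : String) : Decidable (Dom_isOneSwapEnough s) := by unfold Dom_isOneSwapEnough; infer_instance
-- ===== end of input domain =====

-- B finds the outermost mismatched pair and only tries swaps touching it: O(n^2) instead of A's O(n^3).


-- ===== PORT A =====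
def isOneSwapEnough (s : String) : Bool :=
  if s.toList = s.toList.reverse then true
  else
    (PySem.List.pyRange 0 ((s.toList.length : Int) - 1) 1).any fun i =>
      (PySem.List.pyRange (i + 1) (s.toList.length : Int) 1).any fun j =>
        let s1 := PySem.List.slice s.toList none (some i) ++ [PySem.List.pyGetD s.toList j ' ']
          ++ PySem.List.slice s.toList (some (i + 1)) (some j) ++ [PySem.List.pyGetD s.toList i ' ']
          ++ PySem.List.slice s.toList (some (j + 1)) none
        decide (s1 = s1.reverse)

-- ===== PORT B =====
-- the while loop: move i,j inward while the characters match
def scanB (l : List Char) (i j : Nat) : Nat × Nat :=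
  if h : i < j ∧ l.getD i ' ' = l.getD j ' ' then scanB l (i + 1) (j - 1) else (i, j)
  termination_by j - i
  decreasing_by omega

-- t[a], t[k] = t[k], t[a]
def swapB (l : List Char) (a k : Nat) : List Char :=
  (l.set a (l.getD k ' ')).set k (l.getD a ' ')

def isOneSwapEnough_alt (s : String) : Bool :=
  let t := s.toList
  let n := t.length
  let p := scanB t 0 (n - 1)
  if p.2 ≤ p.1 then true
  else (List.range n).any fun k => [p.1, p.2].any fun a =>
    let t' := swapB t a k
    decide (t' = t'.reverse)

-- ===== PRECONDITION & SPEC =====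
def Spec_isOneSwapEnough (s : String) (out : Bool) : Prop := out = isOneSwapEnough_alt s
instance (s : String) (out : Bool) : Decidable (Spec_isOneSwapEnough s out) := by unfold Spec_isOneSwapEnough; infer_instance

-- ===== CLAIM (what is proved, stated in full; the proofs are below) =====
def Claim_equal_isOneSwapEnough : Prop := ∀ (s : String), Dom_isOneSwapEnough s → Spec_isOneSwapEnough s (isOneSwapEnough s)

-- ===== LEMMAS AND PROOFS =====

-- palindrome, characterized pointwise via getD
theorem pal_iff (l : List Char) :
    l = l.reverse ↔ ∀ a, a < l.length → l.getD a ' ' = l.getD (l.length - 1 - a) ' ' := by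
  constructor
  · intro h a ha
    conv_lhs => rw [h]
    rw [List.getD_eq_getElem _ _ (by simpa using ha), List.getD_eq_getElem _ _ (by omega)]
    simp [List.getElem_reverse]
  · intro h
    apply List.ext_getElem (by simp)
    intro i h1 h2
    rw [List.getElem_reverse]
    have := h i h1
    rw [List.getD_eq_getElem _ _ h1, List.getD_eq_getElem _ _ (by omega)] at this
    exact this

theorem length_swapB (l : List Char) (a k : Nat) : (swapB l a k).length = l.length := by
  simp [swapB]

theorem swapB_getD_other (l : List Char) (a k c : Nat) (d : Char) (hca : c ≠ a) (hck : c ≠ k) :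
    (swapB l a k).getD c d = l.getD c d := by
  simp [swapB, List.getD_eq_getElem?_getD, List.getElem?_set_ne (Ne.symm hck),
    List.getElem?_set_ne (Ne.symm hca)]

theorem swapB_comm (l : List Char) (a k : Nat) : swapB l a k = swapB l k a := by
  by_cases h : a = k
  · subst h; rfl
  · unfold swapB; rw [List.set_comm]; omega

theorem swapB_self (l : List Char) (a : Nat) (ha : a < l.length) : swapB l a a = l := by
  simp [swapB, List.getD_eq_getElem?_getD, List.getElem?_eq_getElem ha]

-- the invariant of B's inward scan
theorem scanB_spec (l : List Char) (i j : Nat) (hij : i + j = l.length - 1)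
    (hpre : ∀ a, a < i → l.getD a ' ' = l.getD (l.length - 1 - a) ' ') :
    (scanB l i j).1 + (scanB l i j).2 = l.length - 1 ∧
    (∀ a, a < (scanB l i j).1 → l.getD a ' ' = l.getD (l.length - 1 - a) ' ') ∧
    ((scanB l i j).2 ≤ (scanB l i j).1 ∨
      ((scanB l i j).1 < (scanB l i j).2 ∧
        l.getD (scanB l i j).1 ' ' ≠ l.getD (scanB l i j).2 ' ')) := by
  induction i, j using scanB.induct l with
  | case1 i j h ih =>
    rw [scanB, dif_pos h]
    apply ih
    · omega
    · intro a ha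
      by_cases hai : a < i
      · exact hpre a hai
      · have hae : a = i := by omega
        subst hae
        have hje : l.length - 1 - a = j := by omega
        rw [hje]; exact h.2
  | case2 i j h =>
    rw [scanB, dif_neg h]
    refine ⟨hij, hpre, ?_⟩
    by_cases hlt : i < j
    · right; exact ⟨hlt, fun hc => h ⟨hlt, hc⟩⟩
    · left; omega

-- if the scan crossed, the whole list is a palindrome
theorem pal_of_scan_crossed (l : List Char) (i' j' : Nat) (hsum : i' + j' = l.length - 1)
    (hle : j' ≤ i') (hpre : ∀ a, a < i' → l.getD a ' ' = l.getD (l.length - 1 - a) ' ') :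
    l = l.reverse := by
  rw [pal_iff]
  intro a ha
  by_cases h1 : a < i'
  · exact hpre a h1
  · by_cases h2 : l.length - 1 - a < i'
    · have := hpre _ h2
      have heq : l.length - 1 - (l.length - 1 - a) = a := by omega
      rw [heq] at this
      exact this.symm
    · have : l.length - 1 - a = a := by omega
      rw [this]

-- A's sliced-together string IS the swap of positions i and j
theorem slice_eq_swapB (l : List Char) (i j : Nat) (hij : i < j) (hj : j < l.length) :
    PySem.List.slice l none (some (i : Int)) ++ [PySem.List.pyGetD l (j : Int) ' ']
      ++ PySem.List.slice l (some ((i : Int) + 1)) (some (j : Int))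
      ++ [PySem.List.pyGetD l (i : Int) ' ']
      ++ PySem.List.slice l (some ((j : Int) + 1)) none = swapB l i j := by
  have hi : i < l.length := by omega
  have h1 : ((i : Int) + 1) = ((i + 1 : Nat) : Int) := by push_cast; ring
  have h2 : ((j : Int) + 1) = ((j + 1 : Nat) : Int) := by push_cast; ring
  rw [h1, h2, PySem.List.slice_to_natCast, PySem.List.slice_natCast, PySem.List.slice_from_natCast,
    PySem.List.pyGetD_natCast, PySem.List.pyGetD_natCast]
  unfold swapB
  rw [List.set_eq_take_cons_drop _ hi]
  rw [List.set_append_right _ _ (by simp; omega)]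
  have hlen : (l.take i).length = i := by simp; omega
  rw [hlen]
  have h3 : j - i = (j - i - 1) + 1 := by omega
  rw [h3, List.set_cons_succ]
  rw [List.set_eq_take_cons_drop _ (by simp; omega)]
  rw [List.drop_drop]
  have h4 : i + 1 + (j - i - 1 + 1) = j + 1 := by omega
  have h5 : j - (i + 1) = j - i - 1 := by omega
  rw [h4, h5]
  simp

-- A = true iff the list is a palindrome or some genuine swap makes it one
theorem A_iff (s : String) :
    isOneSwapEnough s = true ↔
      (s.toList = s.toList.reverse ∨
        ∃ i j : Nat, i < j ∧ j < s.toList.length ∧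
          swapB s.toList i j = (swapB s.toList i j).reverse) := by
  by_cases hpal : s.toList = s.toList.reverse
  · exact iff_of_true (by simp only [isOneSwapEnough, if_pos hpal]) (Or.inl hpal)
  · simp only [isOneSwapEnough, if_neg hpal, List.any_eq_true,
      PySem.List.mem_pyRange_one, decide_eq_true_eq]
    constructor
    · rintro ⟨i, ⟨hi0, hi1⟩, j, ⟨hj0, hj1⟩, hp⟩
      refine Or.inr ⟨i.toNat, j.toNat, by omega, by omega, ?_⟩
      have hie : i = (i.toNat : Int) := by omega
      have hje : j = (j.toNat : Int) := by omega
      rw [hie, hje, slice_eq_swapB s.toList i.toNat j.toNat (by omega) (by omega)] at hp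
      exact hp
    · rintro (h | ⟨i, j, hij, hjn, hp⟩)
      · exact absurd h hpal
      · refine ⟨(i : Int), ⟨by omega, by omega⟩, (j : Int), ⟨by omega, by omega⟩, ?_⟩
        rw [slice_eq_swapB s.toList i j hij hjn]
        exact hp

-- B = true iff palindrome, or else some swap touching the outermost mismatch works
theorem B_iff (s : String) :
    isOneSwapEnough_alt s = true ↔
      ((scanB s.toList 0 (s.toList.length - 1)).2 ≤ (scanB s.toList 0 (s.toList.length - 1)).1 ∨
        ∃ k, k < s.toList.length ∧
          ((swapB s.toList (scanB s.toList 0 (s.toList.length - 1)).1 k =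
              (swapB s.toList (scanB s.toList 0 (s.toList.length - 1)).1 k).reverse) ∨
           (swapB s.toList (scanB s.toList 0 (s.toList.length - 1)).2 k =
              (swapB s.toList (scanB s.toList 0 (s.toList.length - 1)).2 k).reverse))) := by
  by_cases hc : (scanB s.toList 0 (s.toList.length - 1)).2 ≤ (scanB s.toList 0 (s.toList.length - 1)).1
  · exact iff_of_true (by simp only [isOneSwapEnough_alt]; rw [if_pos hc]) (Or.inl hc)
  · simp only [isOneSwapEnough_alt]
    rw [if_neg hc]
    simp only [List.any_eq_true, List.mem_range, List.mem_cons, decide_eq_true_eq]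
    constructor
    · rintro ⟨k, hk, a, (rfl | rfl | h), hp⟩
      · exact Or.inr ⟨k, hk, Or.inl hp⟩
      · exact Or.inr ⟨k, hk, Or.inr hp⟩
      · cases h
    · rintro (h | ⟨k, hk, hp | hp⟩)
      · exact absurd h hc
      · exact ⟨k, hk, _, Or.inl rfl, hp⟩
      · exact ⟨k, hk, _, Or.inr (Or.inl rfl), hp⟩

-- any palindrome-making swap must touch the outermost mismatched pair
theorem swap_must_touch (l : List Char) (i0 j0 i j : Nat)
    (hsum : i0 + j0 = l.length - 1) (hlt : i0 < j0)
    (hne : l.getD i0 ' ' ≠ l.getD j0 ' ')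
    (hij : i < j) (hj : j < l.length)
    (hp : swapB l i j = (swapB l i j).reverse) :
    i = i0 ∨ i = j0 ∨ j = i0 ∨ j = j0 := by
  by_contra hcon
  push Not at hcon
  obtain ⟨h1, h2, h3, h4⟩ := hcon
  have hlen : (swapB l i j).length = l.length := length_swapB l i j
  have hpal := (pal_iff (swapB l i j)).1 hp
  have hi0n : i0 < l.length := by omega
  have := hpal i0 (by omega)
  rw [hlen] at this
  have hj0e : l.length - 1 - i0 = j0 := by omega
  rw [hj0e] at this
  rw [swapB_getD_other l i j i0 ' ' (Ne.symm h1) (Ne.symm h3),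
    swapB_getD_other l i j j0 ' ' (Ne.symm h2) (Ne.symm h4)] at this
  exact hne this

theorem main_iff (s : String) : isOneSwapEnough s = true ↔ isOneSwapEnough_alt s = true := by
  rw [A_iff, B_iff]
  obtain ⟨hsum, hpre, hcase⟩ := scanB_spec s.toList 0 (s.toList.length - 1) (by omega)
    (by intro a ha; omega)
  rcases hcase with hcross | ⟨hlt, hne⟩
  · have hpal := pal_of_scan_crossed s.toList _ _ hsum hcross hpre
    exact iff_of_true (Or.inl hpal) (Or.inl hcross)
  · set p := scanB s.toList 0 (s.toList.length - 1) with hp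
    have hp1n : p.1 < s.toList.length := by omega
    have hp2n : p.2 < s.toList.length := by omega
    have hj0e : s.toList.length - 1 - p.1 = p.2 := by omega
    have hnpal : ¬ (s.toList = s.toList.reverse) := by
      intro hpal
      exact hne (hj0e ▸ (pal_iff s.toList).1 hpal p.1 hp1n)
    constructor
    · rintro (hpal | ⟨i, j, hij, hjn, hsw⟩)
      · exact absurd hpal hnpal
      · rcases swap_must_touch s.toList p.1 p.2 i j hsum hlt hne hij hjn hsw with
          rfl | rfl | rfl | rfl
        · exact Or.inr ⟨j, hjn, Or.inl hsw⟩
        · exact Or.inr ⟨j, hjn, Or.inr hsw⟩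
        · exact Or.inr ⟨i, by omega, Or.inl (swapB_comm s.toList i p.1 ▸ hsw)⟩
        · exact Or.inr ⟨i, by omega, Or.inr (swapB_comm s.toList i p.2 ▸ hsw)⟩
    · rintro (hcross | ⟨k, hk, hsw | hsw⟩)
      · omega
      · rcases Nat.lt_trichotomy k p.1 with hlt' | rfl | hlt'
        · exact Or.inr ⟨k, p.1, hlt', hp1n, swapB_comm s.toList p.1 k ▸ hsw⟩
        · rw [swapB_self s.toList p.1 hp1n] at hsw
          exact absurd hsw hnpal
        · exact Or.inr ⟨p.1, k, hlt', hk, hsw⟩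
      · rcases Nat.lt_trichotomy k p.2 with hlt' | rfl | hlt'
        · exact Or.inr ⟨k, p.2, hlt', hp2n, swapB_comm s.toList p.2 k ▸ hsw⟩
        · rw [swapB_self s.toList p.2 hp2n] at hsw
          exact absurd hsw hnpal
        · exact Or.inr ⟨p.2, k, hlt', hk, hsw⟩

-- ===== VERDICT (by name: the statement is the Claim_ definition above) =====
theorem isOneSwapEnough_spec : Claim_equal_isOneSwapEnough := by
  intro s _hdom
  unfold Spec_isOneSwapEnough
  have h := main_iff s
  cases ha : isOneSwapEnough s <;> cases hb : isOneSwapEnough_alt s <;> simp_all
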